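-- pv_equiv track=rewrite | github.com/comwork2016/algorithm | dynamicprogramming/tsp/tsp.py | findfirst10
-- ===== SOURCE A (Python) =====
-- def findfirst10(flag:list):
--     pos10 = -1
--     count1 = 0
--     for i in range(len(flag)-1):
--         if flag[i] ==1 and flag[i+1] == 0:
--             pos10 = i
--             return pos10,count1
--         if flag[i] == 1:
--             count1+=1
--     return pos10,count1
-- ===== SOURCE B (Python) =====
-- def findfirst10(flag: list):
--     i = next((i for i in range(len(flag) - 1) if flag[i] == 1 and flag[i + 1] == 0), -1)
--     if i != -1:
--         return (i, flag[:i].count(1))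
--     return (-1, flag[:-1].count(1))
-- ===== Notes on version B (the rewrite author's own statement) =====
-- stated objective: simpler
-- what changed: Replaced the single accumulator-threaded scan (count maintained inside the search loop) by a locate-then-count decomposition: first find the index of the first '1,0' pair, then count the 1s in the appropriate prefix slice in a separate pass.
import Mathlib
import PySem

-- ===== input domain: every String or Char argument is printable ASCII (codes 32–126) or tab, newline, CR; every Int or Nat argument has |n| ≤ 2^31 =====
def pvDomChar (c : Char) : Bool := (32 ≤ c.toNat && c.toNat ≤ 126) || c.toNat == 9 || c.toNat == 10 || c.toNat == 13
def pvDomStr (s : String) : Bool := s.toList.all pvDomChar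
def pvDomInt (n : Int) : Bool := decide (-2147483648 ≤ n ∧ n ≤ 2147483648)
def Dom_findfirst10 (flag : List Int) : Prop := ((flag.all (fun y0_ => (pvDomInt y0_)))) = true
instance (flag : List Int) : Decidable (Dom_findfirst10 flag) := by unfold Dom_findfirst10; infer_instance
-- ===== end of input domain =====

-- B replaces A's single accumulator-threaded scan by a locate-then-count two-pass
-- decomposition (find the pattern index, then count 1s in a prefix slice); objective: simpler.

-- ===== PORT A =====
-- A's 'for i in range(len(flag)-1)' loop with early return, threading count1.
def findfirst10Go (flag : List Int) (count1 : Int) : List Int → Int × Int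
  | [] => (-1, count1)
  | i :: rest =>
    if PySem.List.pyGetD flag i 0 = 1 ∧ PySem.List.pyGetD flag (i + 1) 0 = 0 then
      (i, count1)
    else if PySem.List.pyGetD flag i 0 = 1 then
      findfirst10Go flag (count1 + 1) rest
    else
      findfirst10Go flag count1 rest

def findfirst10 (flag : List Int) : Int × Int :=
  findfirst10Go flag 0 (PySem.List.pyRange 0 ((flag.length : Int) - 1) 1)

-- ===== PORT B =====
-- B's 'next((i for i in range(len(flag)-1) if ...), -1)'.
def findIdx10 (flag : List Int) : List Int → Int
  | [] => -1
  | i :: rest =>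
    if PySem.List.pyGetD flag i 0 = 1 ∧ PySem.List.pyGetD flag (i + 1) 0 = 0 then i
    else findIdx10 flag rest

def findfirst10_alt (flag : List Int) : Int × Int :=
  let i := findIdx10 flag (PySem.List.pyRange 0 ((flag.length : Int) - 1) 1)
  if i ≠ -1 then
    (i, (PySem.List.count (PySem.List.slice flag none (some i)) 1 : Int))
  else
    (-1, (PySem.List.count (PySem.List.slice flag none (some (-1))) 1 : Int))

-- ===== PRECONDITION & SPEC =====
def Spec_findfirst10 (flag : List Int) (out : Int × Int) : Prop := out = findfirst10_alt flag
instance (flag : List Int) (out : Int × Int) : Decidable (Spec_findfirst10 flag out) := by unfold Spec_findfirst10; infer_instance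

-- ===== CLAIM (what is proved, stated in full; the proofs are below) =====
def Claim_equal_findfirst10 : Prop := ∀ (flag : List Int), Dom_findfirst10 flag → Spec_findfirst10 flag (findfirst10 flag)

-- ===== LEMMAS AND PROOFS =====

-- findIdx10 returns -1 or an element of the scanned index list.
lemma findIdx10_mem (flag : List Int) :
    ∀ L : List Int, findIdx10 flag L = -1 ∨ findIdx10 flag L ∈ L := by
  intro L
  induction L with
  | nil => left; rfl
  | cons i rest ih =>
    simp only [findIdx10]
    split_ifs with h
    · right; exact List.mem_cons_self
    · rcases ih with h1 | h1
      · left; exact h1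
      · right; exact List.mem_cons_of_mem _ h1

-- The loop invariant: A's Go on the suffix range [k, len-1) equals B's locate-then-count
-- on the same suffix, with the accumulator added.
lemma go_invariant (flag : List Int) :
    ∀ (m : Nat) (k : Nat) (c : Int), m = ((flag.length : Int) - 1 - k).toNat →
      findfirst10Go flag c (PySem.List.pyRange (k : Int) ((flag.length : Int) - 1) 1) =
        (let i := findIdx10 flag (PySem.List.pyRange (k : Int) ((flag.length : Int) - 1) 1)
         if i = -1 then
           (-1, c + (((flag.drop k).take (flag.length - 1 - k)).count 1 : Int))
         else
           (i, c + (((flag.drop k).take (i.toNat - k)).count 1 : Int))) := by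
  intro m
  induction m with
  | zero =>
    intro k c hm
    have hk : (flag.length : Int) - 1 ≤ (k : Int) := by omega
    rw [PySem.List.pyRange_one_eq_nil hk]
    have hk2 : flag.length - 1 - k = 0 := by omega
    simp [findfirst10Go, findIdx10, hk2]
  | succ m ih =>
    intro k c hm
    have hk : (k : Int) < (flag.length : Int) - 1 := by omega
    have hklen : k < flag.length := by omega
    rw [PySem.List.pyRange_one_cons hk]
    have hget : PySem.List.pyGetD flag (k : Int) 0 = flag[k] := by
      rw [PySem.List.pyGetD_natCast, List.getD_eq_getElem flag 0 hklen]
    have hdrop : flag.drop k = flag[k] :: flag.drop (k + 1) :=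
      List.drop_eq_getElem_cons hklen
    have hcast : ((k : Int) + 1) = ((k + 1 : Nat) : Int) := by push_cast; ring
    simp only [findfirst10Go, findIdx10]
    by_cases h1 : PySem.List.pyGetD flag (k : Int) 0 = 1 ∧ PySem.List.pyGetD flag ((k : Int) + 1) 0 = 0
    · -- pattern found at k: both sides return (k, c)
      rw [if_pos h1]
      have hkne : ¬ ((k : Int) = -1) := by omega
      simp only [if_pos h1, if_neg hkne, Int.toNat_natCast, Nat.sub_self, List.take_zero,
        List.count_nil, Nat.cast_zero, add_zero]
    · rw [if_neg h1]
      simp only [if_neg h1]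
      rw [hcast]
      rcases findIdx10_mem flag (PySem.List.pyRange ((k + 1 : Nat) : Int) ((flag.length : Int) - 1) 1) with hm1 | hm1
      · -- not found in the rest
        by_cases h2 : PySem.List.pyGetD flag (k : Int) 0 = 1
        · rw [if_pos h2, ih (k + 1) (c + 1) (by omega)]
          simp only [hm1]
          have hlen : flag.length - 1 - k = (flag.length - 1 - (k + 1)) + 1 := by omega
          rw [hlen, hdrop, List.take_succ_cons, List.count_cons]
          have h1f : flag[k] = 1 := by rw [← hget]; exact h2
          simp [h1f]; ring
        · rw [if_neg h2, ih (k + 1) c (by omega)]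
          simp only [hm1]
          have hlen : flag.length - 1 - k = (flag.length - 1 - (k + 1)) + 1 := by omega
          rw [hlen, hdrop, List.take_succ_cons, List.count_cons]
          have h1f : ¬ (flag[k] = 1) := by rw [← hget]; exact h2
          simp [h1f]
      · -- found at some i ≥ k+1 in the rest
        rw [PySem.List.mem_pyRange_one] at hm1
        set i := findIdx10 flag (PySem.List.pyRange ((k + 1 : Nat) : Int) ((flag.length : Int) - 1) 1) with hi
        have hine : ¬ (i = -1) := by omega
        have hlen : i.toNat - k = (i.toNat - (k + 1)) + 1 := by omega
        by_cases h2 : PySem.List.pyGetD flag (k : Int) 0 = 1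
        · rw [if_pos h2, ih (k + 1) (c + 1) (by omega)]
          simp only [← hi, if_neg hine]
          rw [hlen, hdrop, List.take_succ_cons, List.count_cons]
          have h1f : flag[k] = 1 := by rw [← hget]; exact h2
          simp [h1f]; ring
        · rw [if_neg h2, ih (k + 1) c (by omega)]
          simp only [← hi, if_neg hine]
          rw [hlen, hdrop, List.take_succ_cons, List.count_cons]
          have h1f : ¬ (flag[k] = 1) := by rw [← hget]; exact h2
          simp [h1f]

-- ===== VERDICT (by name: the statement is the Claim_ definition above) =====
theorem findfirst10_spec : Claim_equal_findfirst10 := by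
  intro flag _
  unfold Spec_findfirst10 findfirst10 findfirst10_alt
  have h := go_invariant flag ((flag.length : Int) - 1 - (0 : Nat)).toNat 0 0 rfl
  simp only [Nat.cast_zero] at h
  rw [h]
  rcases findIdx10_mem flag (PySem.List.pyRange 0 ((flag.length : Int) - 1) 1) with hm1 | hm1
  · simp only [hm1, ne_eq, not_true_eq_false, if_false]
    rw [PySem.List.slice_to_neg_one, List.dropLast_eq_take]
    simp [PySem.List.count]
  · rw [PySem.List.mem_pyRange_one] at hm1
    set i := findIdx10 flag (PySem.List.pyRange 0 ((flag.length : Int) - 1) 1) with hi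
    have hine : ¬ (i = -1) := by omega
    simp only [ne_eq, hine, not_false_eq_true, if_true]
    rw [PySem.List.slice_to flag (by omega : (0:Int) ≤ i)]
    simp [PySem.List.count]
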